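-- pv_equiv track=rewrite | github.com/oandresrincon/IntegerPairFinderLogger | versions/find_integer_pairs_with_limits.py | find_pairs_for_range
-- ===== SOURCE A (Python) =====
-- def find_pairs_for_range(start_a, end_a, start_b, end_b):
--     found_pairs = []
--
--     for a in range(start_a, end_a + 1):
--         a_const = 3 * a - 1
--         for b in range(start_b, end_b + 1):
--             b_const = 3 * b - 1
--
--             if (a - 1) % b_const == 0 and (b - 1) % a_const == 0:
--                 found_pairs.append((a, b))
--
--     return found_pairs
-- ===== SOURCE B (Python) =====
-- def find_pairs_for_range(start_a, end_a, start_b, end_b):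
--     # For a fixed a, (b - 1) % (3*a - 1) == 0 means b ≡ 1 (mod |3a-1|), so the
--     # valid b's form an arithmetic progression; collect them per a with a helper,
--     # then assemble the result as one comprehension (no nested scan, no accumulator).
--     if start_b > end_b:
--         return []
--
--     def bs_for(a):
--         step = abs(3 * a - 1)
--         first = start_b + (1 - start_b) % step
--         return [b for b in range(first, end_b + 1, step) if (a - 1) % (3 * b - 1) == 0]
--
--     return [(a, b) for a in range(start_a, end_a + 1) for b in bs_for(a)]
-- ===== Notes on version B (the rewrite author's own statement) =====
-- stated objective: alternative
-- what changed: B replaces A's nested scan-and-append loops by a per-a helper that enumerates only the arithmetic progression b ≡ 1 (mod |3a-1|) inside [start_b,end_b] (so one of A's two divisibility tests disappears) and assembles the pairs with a flat comprehension instead of an accumulator.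
import Mathlib
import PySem

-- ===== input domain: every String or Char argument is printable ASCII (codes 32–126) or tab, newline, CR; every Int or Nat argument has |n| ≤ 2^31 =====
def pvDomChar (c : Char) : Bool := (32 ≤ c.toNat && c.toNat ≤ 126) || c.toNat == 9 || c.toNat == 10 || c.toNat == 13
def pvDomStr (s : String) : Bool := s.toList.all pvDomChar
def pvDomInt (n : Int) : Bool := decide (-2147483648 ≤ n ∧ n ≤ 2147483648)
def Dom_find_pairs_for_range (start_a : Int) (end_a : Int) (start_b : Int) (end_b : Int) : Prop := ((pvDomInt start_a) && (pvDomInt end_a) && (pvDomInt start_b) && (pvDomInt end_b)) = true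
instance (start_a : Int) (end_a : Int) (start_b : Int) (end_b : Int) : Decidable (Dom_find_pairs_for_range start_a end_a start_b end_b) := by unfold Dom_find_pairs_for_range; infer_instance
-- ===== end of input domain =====

-- B collects, per a, only the arithmetic progression b ≡ 1 (mod |3a-1|) via a helper and
-- flat-maps the pairs together, instead of A's nested scan with an append accumulator.


-- ===== PORT A =====
def find_pairs_for_range (start_a : Int) (end_a : Int) (start_b : Int) (end_b : Int) : List (Int × Int) :=
  (PySem.List.pyRange start_a (end_a + 1) 1).foldl (fun acc a =>
    let a_const := 3 * a - 1
    (PySem.List.pyRange start_b (end_b + 1) 1).foldl (fun acc b =>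
      let b_const := 3 * b - 1
      if PySem.Int.mod (a - 1) b_const = 0 ∧ PySem.Int.mod (b - 1) a_const = 0
      then acc ++ [(a, b)] else acc) acc) []

-- ===== PORT B =====
-- helper bs_for: the b's paired with a given a, taken from the progression b ≡ 1 (mod |3a-1|)
def pvBsFor (start_b : Int) (end_b : Int) (a : Int) : List Int :=
  let step := |3 * a - 1|
  let first := start_b + PySem.Int.mod (1 - start_b) step
  (PySem.List.pyRange first (end_b + 1) step).filter
    (fun b => decide (PySem.Int.mod (a - 1) (3 * b - 1) = 0))

def find_pairs_for_range_alt (start_a : Int) (end_a : Int) (start_b : Int) (end_b : Int) : List (Int × Int) :=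
  if start_b > end_b then []
  else (PySem.List.pyRange start_a (end_a + 1) 1).flatMap (fun a =>
    (pvBsFor start_b end_b a).map (fun b => (a, b)))

-- ===== PRECONDITION & SPEC =====
def Spec_find_pairs_for_range (start_a : Int) (end_a : Int) (start_b : Int) (end_b : Int) (out : List (Int × Int)) : Prop := out = find_pairs_for_range_alt start_a end_a start_b end_b
instance (start_a : Int) (end_a : Int) (start_b : Int) (end_b : Int) (out : List (Int × Int)) : Decidable (Spec_find_pairs_for_range start_a end_a start_b end_b out) := by unfold Spec_find_pairs_for_range; infer_instance

-- ===== CLAIM =====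
def Claim_equal_find_pairs_for_range : Prop := ∀ (start_a : Int) (end_a : Int) (start_b : Int) (end_b : Int), Dom_find_pairs_for_range start_a end_a start_b end_b → Spec_find_pairs_for_range start_a end_a start_b end_b (find_pairs_for_range start_a end_a start_b end_b)

-- ===== LEMMAS AND PROOFS =====

-- two strictly increasing integer lists with the same members are equal
theorem eq_of_pairwise_lt_of_mem_iff {l1 l2 : List Int}
    (h1 : l1.Pairwise (· < ·)) (h2 : l2.Pairwise (· < ·))
    (h : ∀ x, x ∈ l1 ↔ x ∈ l2) : l1 = l2 := by
  have n1 : l1.Nodup := h1.imp (fun hab => ne_of_lt hab)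
  have n2 : l2.Nodup := h2.imp (fun hab => ne_of_lt hab)
  have hp : l1.Perm l2 := (List.perm_ext_iff_of_nodup n1 n2).mpr h
  exact List.Perm.eq_of_pairwise (fun a b _ _ hab hba => le_antisymm hab hba)
    (h1.imp le_of_lt) (h2.imp le_of_lt) hp

-- the arithmetic-progression range is strictly increasing
theorem pairwise_lt_pyRange_pos (a b s : Int) (hs : 0 < s) :
    (PySem.List.pyRange a b s).Pairwise (· < ·) := by
  rw [PySem.List.pyRange_of_pos a b hs]
  exact List.Pairwise.map _ (fun i j (hij : i < j) => by
    have : (i : Int) < (j : Int) := by exact_mod_cast hij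
    nlinarith) List.pairwise_lt_range

-- within [lo, hi), the x with M ∣ x - 1 are exactly the arithmetic progression
-- starting at the least b0 ≥ lo with b0 ≡ 1 (mod M), with step M
theorem filter_dvd_eq_pyRange_aux (M lo hi b0 : Int) (hM : 0 < M)
    (hlo : lo ≤ b0) (hub : b0 < lo + M) (hdvd0 : M ∣ b0 - 1) :
    (PySem.List.pyRange lo hi 1).filter (fun x => decide (M ∣ x - 1))
      = PySem.List.pyRange b0 hi M := by
  apply eq_of_pairwise_lt_of_mem_iff
  · exact List.Pairwise.filter _ (PySem.List.pairwise_lt_pyRange_one lo hi)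
  · exact pairwise_lt_pyRange_pos _ _ _ hM
  · intro x
    simp only [List.mem_filter, PySem.List.mem_pyRange_one,
      PySem.List.mem_pyRange_iff_of_pos hM, decide_eq_true_eq]
    obtain ⟨q, hq⟩ := hdvd0
    constructor
    · rintro ⟨⟨hlox, hhi⟩, k, hk⟩
      have hxb : x - b0 = M * (k - q) := by rw [mul_sub]; omega
      have hj : 0 ≤ k - q := by
        by_contra hneg
        have h0 : k - q ≤ -1 := by omega
        have h1 : M * (k - q) ≤ M * (-1) :=
          mul_le_mul_of_nonneg_left h0 (le_of_lt hM)
        have h2 : M * (-1) = -M := by ring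
        omega
      have hx0 : 0 ≤ x - b0 := hxb ▸ mul_nonneg (le_of_lt hM) hj
      exact ⟨by omega, hhi, k - q, hxb⟩
    · rintro ⟨hb0x, hhi, k, hk⟩
      exact ⟨⟨by omega, hhi⟩, k + q, by rw [mul_add]; omega⟩

-- the starting point used by B satisfies the hypotheses above
theorem filter_dvd_eq_pyRange (M lo hi : Int) (hM : 0 < M) :
    (PySem.List.pyRange lo hi 1).filter (fun x => decide (M ∣ x - 1))
      = PySem.List.pyRange (lo + PySem.Int.mod (1 - lo) M) hi M := by
  have hmod : PySem.Int.mod (1 - lo) M = (1 - lo) % M := PySem.Int.mod_eq_emod_of_pos hM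
  have hge : 0 ≤ (1 - lo) % M := Int.emod_nonneg _ (ne_of_gt hM)
  have hlt : (1 - lo) % M < M := Int.emod_lt_of_pos _ hM
  have hed : (1 - lo) % M = (1 - lo) - M * ((1 - lo) / M) := Int.emod_def _ _
  refine filter_dvd_eq_pyRange_aux M lo hi _ hM (by omega) (by omega) ⟨-((1 - lo) / M), ?_⟩
  rw [hmod, hed]; ring

-- A's inner loop over b, for a fixed a, collects exactly the pairs B builds from bs_for a
theorem inner_loop_eq_bsFor (start_b end_b a : Int)
    (acc : List (Int × Int)) :
    (PySem.List.pyRange start_b (end_b + 1) 1).foldl (fun acc b =>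
        if PySem.Int.mod (a - 1) (3 * b - 1) = 0 ∧ PySem.Int.mod (b - 1) (3 * a - 1) = 0
        then acc ++ [(a, b)] else acc) acc
      = acc ++ (pvBsFor start_b end_b a).map (fun b => (a, b)) := by
  have hne : 3 * a - 1 ≠ 0 := by omega
  have habs : (0:Int) < |3 * a - 1| := abs_pos.mpr hne
  rw [PySem.List.foldl_append_ite]
  congr 1
  unfold pvBsFor
  simp only []
  rw [← filter_dvd_eq_pyRange _ _ _ habs, List.filter_filter]
  congr 1
  apply List.filter_congr
  intro x _
  simp [PySem.Int.mod_eq_zero_iff_dvd, abs_dvd, Bool.and_comm]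

theorem find_pairs_for_range_spec : Claim_equal_find_pairs_for_range := by
  intro start_a end_a start_b end_b _
  unfold Spec_find_pairs_for_range find_pairs_for_range find_pairs_for_range_alt
  by_cases hbe : start_b > end_b
  · rw [if_pos hbe]
    have hnil : PySem.List.pyRange start_b (end_b + 1) 1 = [] :=
      PySem.List.pyRange_one_eq_nil (by omega)
    rw [hnil]
    simp only [List.foldl_nil]
    induction (PySem.List.pyRange start_a (end_a + 1) 1) with
    | nil => rfl
    | cons x xs ih => simp [ih]
  · rw [if_neg hbe]
    have hbody : (fun (acc : List (Int × Int)) (a : Int) =>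
        (PySem.List.pyRange start_b (end_b + 1) 1).foldl (fun acc b =>
          if PySem.Int.mod (a - 1) (3 * b - 1) = 0 ∧ PySem.Int.mod (b - 1) (3 * a - 1) = 0
          then acc ++ [(a, b)] else acc) acc)
        = (fun acc a => acc ++ (pvBsFor start_b end_b a).map (fun b => (a, b))) := by
      funext acc a
      exact inner_loop_eq_bsFor start_b end_b a acc
    simp only []
    rw [hbody, PySem.List.foldl_append_eq_flatMap]
    simp
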